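-- pv_equiv track=rewrite | github.com/meenun12/edube | practice/integer/lexi2.py | solution
-- ===== SOURCE A (Python) =====
-- def solution(A, B, C):
--     a_set = set(A)
--     b_set = set(B)
--     c_set = set(C)
--
--     # Check if all elements of C are present in A or B
--     if c_set.issubset(a_set.union(b_set)):
--         # Check if there are no numbers before letters in C
--         for i, val in enumerate(C):
--             if val.isdigit():
--                 if any(x.isalpha() for x in C[i+1:]):
--                     return False
--                 break
--         return True
--     else:
--         return False
-- ===== SOURCE B (Python) =====
-- def _positions(C, pred):
--     return [i for i, v in enumerate(C) if pred(v)]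
--
-- def solution(A, B, C):
--     allowed = set(A) | set(B)
--     if any(x not in allowed for x in C):
--         return False
--     alpha_pos = _positions(C, str.isalpha)
--     digit_pos = _positions(C, str.isdigit)
--     if alpha_pos and digit_pos and max(alpha_pos) > min(digit_pos):
--         return False
--     return True
-- ===== Notes on version B (the rewrite author's own statement) =====
-- stated objective: alternative
-- what changed: A walks C to the first all-digit element and then scans the remaining suffix for an alphabetic element; B instead builds the index lists of alphabetic and digit elements once and returns False iff both are non-empty and max(alpha positions) > min(digit positions), and replaces A's set-issubset test by a direct any-not-in-allowed membership scan.
import Mathlib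
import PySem

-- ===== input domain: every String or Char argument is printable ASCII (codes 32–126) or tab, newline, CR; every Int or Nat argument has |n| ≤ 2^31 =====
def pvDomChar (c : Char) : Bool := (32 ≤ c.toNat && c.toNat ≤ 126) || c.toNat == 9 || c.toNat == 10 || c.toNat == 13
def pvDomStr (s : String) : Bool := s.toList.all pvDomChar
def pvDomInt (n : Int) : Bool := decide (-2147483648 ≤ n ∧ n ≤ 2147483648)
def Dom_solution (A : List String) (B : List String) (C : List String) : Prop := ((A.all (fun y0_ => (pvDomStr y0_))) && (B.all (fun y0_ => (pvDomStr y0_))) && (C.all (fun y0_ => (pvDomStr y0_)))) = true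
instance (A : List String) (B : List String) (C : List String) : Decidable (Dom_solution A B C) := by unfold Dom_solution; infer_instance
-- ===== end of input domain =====

-- B replaces A's find-first-digit-then-scan-the-suffix loop by building the index
-- lists of alphabetic and digit elements and comparing their extrema (alternative decomposition, same cost).

-- ===== PORT A =====
-- A's for-loop over enumerate(C): at the first element with val.isdigit() it checks
-- any(x.isalpha() for x in C[i+1:]) (= the rest of the list) and stops.
def solScan : List String → Bool
  | [] => true
  | v :: rest =>
    if PySem.Str.strIsdigit v then
      if rest.any (fun x => PySem.Str.strIsalpha x) then false else true
    else solScan rest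

def solution (A : List String) (B : List String) (C : List String) : Bool :=
  let aSet := PySem.Set.ofList A
  let bSet := PySem.Set.ofList B
  let cSet := PySem.Set.ofList C
  if PySem.Set.issubset cSet (PySem.Set.union aSet bSet) then
    solScan C
  else
    false

-- ===== PORT B =====
-- [i for i, v in enumerate(C) if pred(v)]
def positionsB (C : List String) (pred : String → Bool) : List Int :=
  (PySem.List.enumerate C 0).filterMap (fun p => if pred p.2 then some p.1 else none)

def solution_alt (A : List String) (B : List String) (C : List String) : Bool :=
  let allowed := PySem.Set.union (PySem.Set.ofList A) (PySem.Set.ofList B)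
  if C.any (fun x => !(PySem.Set.contains allowed x)) then
    false
  else
    let alphaPos := positionsB C (fun v => PySem.Str.strIsalpha v)
    let digitPos := positionsB C (fun v => PySem.Str.strIsdigit v)
    match PySem.List.max? alphaPos (fun x => x), PySem.List.min? digitPos (fun x => x) with
    | some ma, some md => if decide (md < ma) then false else true
    | _, _ => true

-- ===== PRECONDITION & SPEC =====
def Spec_solution (A : List String) (B : List String) (C : List String) (out : Bool) : Prop := out = solution_alt A B C
instance (A : List String) (B : List String) (C : List String) (out : Bool) : Decidable (Spec_solution A B C out) := by unfold Spec_solution; infer_instance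

-- ===== CLAIM (what is proved, stated in full; the proofs are below) =====
def Claim_equal_solution : Prop := ∀ (A : List String) (B : List String) (C : List String), Dom_solution A B C → Spec_solution A B C (solution A B C)

-- ===== LEMMAS AND PROOFS =====

-- "some element satisfying p has an element satisfying q strictly after it" —
-- the common characterisation both ports are reduced to (p = isdigit, q = isalpha).
def badG {α : Type} (p q : α → Bool) : List α → Bool
  | [] => false
  | v :: rest => (p v && rest.any q) || badG p q rest

-- general-start form of positionsB, for the induction
def posG {α : Type} (pred : α → Bool) (l : List α) (s : Int) : List Int :=
  (PySem.List.enumerate l s).filterMap (fun x => if pred x.2 then some x.1 else none)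

-- B's extremum test, as a function of the two index lists
def condG (al dl : List Int) : Bool :=
  match PySem.List.max? al (fun x => x), PySem.List.min? dl (fun x => x) with
  | some ma, some md => decide (md < ma)
  | _, _ => false

lemma posG_cons {α : Type} (pred : α → Bool) (v : α) (rest : List α) (s : Int) :
    posG pred (v :: rest) s = (if pred v then [s] else []) ++ posG pred rest (s + 1) := by
  simp only [posG, PySem.List.enumerate_cons, List.filterMap_cons]
  split_ifs <;> simp

lemma mem_posG_ge {α : Type} {pred : α → Bool} {l : List α} {s j : Int}
    (h : j ∈ posG pred l s) : s ≤ j := by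
  induction l generalizing s with
  | nil => simp [posG, PySem.List.enumerate] at h
  | cons v rest ih =>
    rw [posG_cons] at h
    rcases List.mem_append.mp h with h1 | h2
    · split_ifs at h1 <;> simp_all
    · have := ih h2; omega

lemma posG_nil_iff {α : Type} (pred : α → Bool) (l : List α) (s : Int) :
    posG pred l s = [] ↔ l.any pred = false := by
  induction l generalizing s with
  | nil => simp [posG, PySem.List.enumerate]
  | cons v rest ih =>
    rw [posG_cons]
    cases hv : pred v
    · simpa [hv] using ih (s + 1)
    · simp [hv]

lemma badG_any_q {α : Type} {p q : α → Bool} {l : List α} (h : badG p q l = true) :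
    l.any q = true := by
  induction l with
  | nil => simp [badG] at h
  | cons v rest ih =>
    simp only [badG, Bool.or_eq_true, Bool.and_eq_true] at h
    simp only [List.any_cons, Bool.or_eq_true]
    rcases h with ⟨_, ha⟩ | h
    · exact Or.inr (by simpa using ha)
    · exact Or.inr (by simpa using ih h)

lemma foldl_min_of_le (s : Int) (t : List Int) (h : ∀ y ∈ t, s ≤ y) :
    t.foldl min s = s := by
  induction t with
  | nil => rfl
  | cons a t' ih =>
    have hmin : min s a = s := min_eq_left (h a (by simp))
    simp only [List.foldl_cons, hmin]
    exact ih (fun y hy => h y (by simp [hy]))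

lemma le_foldl_max_init (s : Int) (t : List Int) : s ≤ t.foldl max s := by
  induction t generalizing s with
  | nil => simp
  | cons a t' ih => exact le_trans (le_max_left s a) (ih (max s a))

lemma condG_posG {α : Type} (p q : α → Bool) (l : List α) (s : Int) :
    condG (posG q l s) (posG p l s) = badG p q l := by
  induction l generalizing s with
  | nil => rfl
  | cons v rest ih =>
    rw [posG_cons, posG_cons]
    cases hd : p v
    case true =>
      -- the first p-element is at position s; the test fires iff a q-position exists after it
      have hmin : PySem.List.min? (s :: posG p rest (s + 1)) (fun x => x) = some s := by
        rw [PySem.List.min?_id_cons,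
          foldl_min_of_le _ _ (fun y hy => by have := mem_posG_ge hy; omega)]
      have hbad : badG p q (v :: rest) = rest.any q := by
        cases hbr : badG p q rest
        · simp [badG, hd, hbr]
        · simp [badG, hbr, badG_any_q hbr]
      rw [hbad]
      simp only [reduceIte, List.singleton_append]
      cases hA : rest.any q
      case false =>
        have hposA : posG q rest (s + 1) = [] := (posG_nil_iff _ _ _).mpr hA
        rw [hposA]
        cases ha : q v
        · simp [condG, PySem.List.max?]
        · simp only [reduceIte, List.append_nil, condG, PySem.List.max?_id_cons, List.foldl_nil]
          rw [hmin]
          simp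
      case true =>
        -- a q-element exists in rest: its position is ≥ s + 1 > s, the minimal p-position
        have hne : posG q rest (s + 1) ≠ [] := by
          intro h0; rw [posG_nil_iff] at h0; rw [h0] at hA; cases hA
        obtain ⟨a, t', ht⟩ := List.exists_cons_of_ne_nil hne
        have has : s + 1 ≤ a := mem_posG_ge (by rw [ht]; simp)
        cases ha : q v
        · rw [ht]
          simp only [Bool.false_eq_true, reduceIte, List.nil_append, condG,
            PySem.List.max?_id_cons]
          rw [hmin]
          have h1 : a ≤ t'.foldl max a := le_foldl_max_init a t'
          simp only [decide_eq_true_eq]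
          omega
        · rw [ht]
          simp only [reduceIte, List.singleton_append, condG, PySem.List.max?_id_cons,
            List.foldl_cons]
          rw [hmin]
          have h1 : a ≤ t'.foldl max (max s a) := le_trans (le_max_right s a)
            (le_foldl_max_init _ _)
          simp only [decide_eq_true_eq]
          omega
    case false =>
      -- v is not a p-element: the p-positions are exactly those of rest
      have hbad : badG p q (v :: rest) = badG p q rest := by simp [badG, hd]
      rw [hbad, ← ih (s + 1)]
      simp only [Bool.false_eq_true, reduceIte, List.nil_append]
      cases ha : q v
      case false => simp only [Bool.false_eq_true, reduceIte, List.nil_append]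
      case true =>
        simp only [reduceIte, List.singleton_append]
        cases hdt : posG p rest (s + 1) with
        | nil => simp [condG, PySem.List.min?]
        | cons d dt' =>
          have hmin : PySem.List.min? (d :: dt') (fun x => x) = some (dt'.foldl min d) :=
            PySem.List.min?_id_cons ..
          have hmdge : s + 1 ≤ dt'.foldl min d := by
            have hmem := PySem.List.min?_mem (key := fun x => x) hmin
            have hmem' : dt'.foldl min d ∈ posG p rest (s + 1) := by rw [hdt]; exact hmem
            exact mem_posG_ge hmem'
          cases hat : posG q rest (s + 1) with
          | nil =>
            simp only [condG, List.foldl_nil, PySem.List.max?]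
            rw [hmin]
            exact decide_eq_false (by omega)
          | cons a t' =>
            have has : s + 1 ≤ a := mem_posG_ge (by rw [hat]; simp)
            simp only [condG, PySem.List.max?_id_cons, List.foldl_cons]
            rw [max_eq_right (by omega : s ≤ a)]

lemma solScan_eq_not_badG (l : List String) :
    solScan l = !(badG (fun x => PySem.Str.strIsdigit x) (fun x => PySem.Str.strIsalpha x) l) := by
  induction l with
  | nil => rfl
  | cons v rest ih =>
    show (if PySem.Str.strIsdigit v = true then
            if (rest.any fun x => PySem.Str.strIsalpha x) = true then false else true
          else solScan rest)
        = !((PySem.Str.strIsdigit v && rest.any fun x => PySem.Str.strIsalpha x)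
            || badG (fun x => PySem.Str.strIsdigit x) (fun x => PySem.Str.strIsalpha x) rest)
    cases hd : PySem.Str.strIsdigit v
    · rw [ih]
      simp only [Bool.false_eq_true, reduceIte, Bool.false_and, Bool.false_or]
    · simp only [reduceIte, Bool.true_and]
      cases ha : rest.any (fun x => PySem.Str.strIsalpha x)
      · have hb : badG (fun x => PySem.Str.strIsdigit x) (fun x => PySem.Str.strIsalpha x) rest
            = false := by
          cases hbr : badG (fun x => PySem.Str.strIsdigit x) (fun x => PySem.Str.strIsalpha x) rest
          · rfl
          · rw [badG_any_q hbr] at ha; cases ha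
        rw [hb]
        simp only [Bool.false_eq_true, reduceIte, Bool.or_false, Bool.not_false]
      · simp only [reduceIte, Bool.true_or, Bool.not_true]

lemma issubset_eq_not_any (A B C : List String) :
    PySem.Set.issubset (PySem.Set.ofList C)
        (PySem.Set.union (PySem.Set.ofList A) (PySem.Set.ofList B))
      = !(C.any (fun x => !(PySem.Set.contains (PySem.Set.union (PySem.Set.ofList A) (PySem.Set.ofList B)) x))) := by
  rw [Bool.eq_iff_iff, PySem.Set.issubset_iff]
  simp only [Bool.not_eq_true', List.any_eq_false, Bool.not_eq_false, PySem.Set.contains_iff]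
  constructor
  · intro h x hx
    exact h x ((PySem.Set.mem_ofList _ _).mpr hx)
  · intro h x hx
    exact h x ((PySem.Set.mem_ofList _ _).mp hx)

lemma positionsB_eq_posG (C : List String) (pred : String → Bool) :
    positionsB C pred = posG pred C 0 := rfl

-- ===== VERDICT (by name: the statement is the Claim_ definition above) =====
theorem solution_spec : Claim_equal_solution := by
  intro A B C _
  unfold Spec_solution
  show solution A B C = solution_alt A B C
  simp only [solution, solution_alt]
  rw [issubset_eq_not_any]
  cases hA : C.any (fun x => !(PySem.Set.contains (PySem.Set.union (PySem.Set.ofList A) (PySem.Set.ofList B)) x))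
  · simp only [Bool.not_false, Bool.false_eq_true, reduceIte]
    rw [solScan_eq_not_badG,
      ← condG_posG (fun x => PySem.Str.strIsdigit x) (fun x => PySem.Str.strIsalpha x) C 0]
    show _ = (match PySem.List.max? (positionsB C fun v => PySem.Str.strIsalpha v) (fun x => x),
        PySem.List.min? (positionsB C fun v => PySem.Str.strIsdigit v) (fun x => x) with
      | some ma, some md => if decide (md < ma) = true then false else true
      | _, _ => true)
    rw [positionsB_eq_posG, positionsB_eq_posG]
    unfold condG
    cases PySem.List.max? (posG (fun v => PySem.Str.strIsalpha v) C 0) (fun x => x) <;>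
      cases PySem.List.min? (posG (fun v => PySem.Str.strIsdigit v) C 0) (fun x => x) <;>
      simp
  · simp only [Bool.not_true, Bool.false_eq_true, reduceIte]
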